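-- pv_equiv track=rewrite | github.com/foxxpy/Codingame-Puzzle-Facile | 004. Chuck Norris/chuck_norris.py | messageToBinary
-- ===== SOURCE A (Python) =====
-- def decimalToBinary(num):
--     """Convertit un nombre décimal en un nombre binaire"""
--     return bin(num).replace("0b", "")
--
-- def messageToBinary(message):
--     """Convertit les caractères d'une chaîne de caractères en binaire"""
--     binary_message = ""
--
--     #On convertit chaque lettre du message en binaire
--     for letter in message:
--         decimal = ord(letter)
--         binary = decimalToBinary(decimal)
--
--         #Si la lettre en binaire contient moins de 7 bit, on rajoute des zéros au début
--         while (len(binary) < 7):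
--             binary = "0"+binary
--
--         binary_message += binary
--
--
--
--     return binary_message
-- ===== SOURCE B (Python) =====
-- def messageToBinary(message):
--     parts = []
--     for c in message:
--         n = ord(c)
--         w = max(7, n.bit_length())
--         parts.append(''.join(str((n >> i) & 1) for i in reversed(range(w))))
--     return ''.join(parts)
-- ===== Notes on version B (the rewrite author's own statement) =====
-- stated objective: alternative
-- what changed: B computes each character's bits arithmetically by shifting and masking over bit positions from max(7, bit_length)-1 down to 0 and joins the pieces once, instead of A's bin-string prefix stripping plus a while loop that prepends zero characters until length 7 with repeated string concatenation.
import Mathlib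
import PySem

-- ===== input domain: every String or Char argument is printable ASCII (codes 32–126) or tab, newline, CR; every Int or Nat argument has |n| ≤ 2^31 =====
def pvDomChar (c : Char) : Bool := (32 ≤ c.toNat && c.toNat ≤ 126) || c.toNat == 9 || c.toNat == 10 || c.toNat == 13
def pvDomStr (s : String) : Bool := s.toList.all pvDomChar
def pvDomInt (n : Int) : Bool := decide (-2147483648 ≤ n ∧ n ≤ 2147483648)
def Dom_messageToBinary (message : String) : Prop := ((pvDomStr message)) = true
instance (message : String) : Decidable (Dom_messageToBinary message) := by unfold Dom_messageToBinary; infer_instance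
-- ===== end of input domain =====

-- B extracts bits arithmetically over bit positions instead of A's bin()+zero-padding loop (alternative decomposition, same cost).


-- ===== PORT A =====
-- bin(n) for n > 0: binary digits, most-significant first (exact for the Nat that ord returns)
def pvBinRec (n : Nat) : List Char :=
  if n = 0 then [] else pvBinRec (n / 2) ++ [if n % 2 = 1 then '1' else '0']

-- decimalToBinary: bin(num) with the prefix stripped
def decimalToBinary (num : Nat) : List Char :=
  if num = 0 then ['0'] else pvBinRec num

-- the while-loop: prepend a zero character until the length reaches 7
def pvPad7 (b : List Char) : List Char :=
  if b.length < 7 then pvPad7 ('0' :: b) else b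
  termination_by 7 - b.length

def messageToBinary (message : String) : String :=
  String.mk (message.toList.foldl
    (fun acc letter => acc ++ pvPad7 (decimalToBinary letter.toNat)) [])

-- ===== PORT B =====
-- n.bit_length()
def pvBitLen (n : Nat) : Nat :=
  if n = 0 then 0 else pvBitLen (n / 2) + 1

-- ''.join(str((n >> i) & 1) for i in reversed(range(w)))
def pvBits (n w : Nat) : List Char :=
  (List.range w).reverse.map (fun i => if (n >>> i) % 2 = 1 then '1' else '0')

def messageToBinary_alt (message : String) : String :=
  String.mk (message.toList.flatMap
    (fun c => pvBits c.toNat (max 7 (pvBitLen c.toNat))))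

-- ===== PRECONDITION & SPEC =====
def Spec_messageToBinary (message : String) (out : String) : Prop := out = messageToBinary_alt message
instance (message : String) (out : String) : Decidable (Spec_messageToBinary message out) := by unfold Spec_messageToBinary; infer_instance

-- ===== CLAIM (what is proved, stated in full; the proofs are below) =====
def Claim_equal_messageToBinary : Prop := ∀ (message : String), Dom_messageToBinary message → Spec_messageToBinary message (messageToBinary message)

-- ===== LEMMAS AND PROOFS =====
theorem bits_succ (n w : Nat) :
    pvBits n (w + 1) = (if (n >>> w) % 2 = 1 then '1' else '0') :: pvBits n w := by
  simp [pvBits, List.range_succ]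

theorem bits_shift (w : Nat) : ∀ n : Nat,
    pvBits n (w + 1) = pvBits (n / 2) w ++ [if n % 2 = 1 then '1' else '0'] := by
  induction w with
  | zero => intro n; simp [pvBits, List.range_succ]
  | succ w ih =>
    intro n
    rw [bits_succ, ih n, bits_succ]
    have h1 : (n / 2) >>> w = n >>> (w + 1) := by
      rw [Nat.shiftRight_eq_div_pow, Nat.shiftRight_eq_div_pow,
        Nat.div_div_eq_div_mul, pow_succ, Nat.mul_comm 2 (2 ^ w)]
    simp [h1]

theorem bits_bitlen (n : Nat) : pvBits n (pvBitLen n) = pvBinRec n := by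
  induction n using Nat.strong_induction_on with
  | _ n ih =>
    by_cases h : n = 0
    · subst h; simp [pvBits, pvBitLen, pvBinRec]
    · rw [pvBitLen, if_neg h, bits_shift, ih (n / 2) (by omega)]
      conv_rhs => rw [pvBinRec]
      rw [if_neg h]

theorem lt_two_pow_bitlen (n : Nat) : n < 2 ^ pvBitLen n := by
  induction n using Nat.strong_induction_on with
  | _ n ih =>
    by_cases h : n = 0
    · subst h; simp [pvBitLen]
    · rw [pvBitLen, if_neg h, pow_succ]
      have := ih (n / 2) (by omega)
      omega

theorem bits_zext (n w k : Nat) (h : n < 2 ^ w) :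
    pvBits n (w + k) = List.replicate k '0' ++ pvBits n w := by
  induction k with
  | zero => simp
  | succ k ihk =>
    have hz : n >>> (w + k) = 0 := by
      rw [Nat.shiftRight_eq_div_pow]
      exact Nat.div_eq_of_lt (lt_of_lt_of_le h (Nat.pow_le_pow_right (by norm_num) (by omega)))
    rw [show w + (k + 1) = (w + k) + 1 by omega, bits_succ, ihk, hz]
    simp [List.replicate_succ]

theorem binRec_length (n : Nat) : (pvBinRec n).length = pvBitLen n := by
  induction n using Nat.strong_induction_on with
  | _ n ih =>
    by_cases h : n = 0
    · subst h; simp [pvBinRec, pvBitLen]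
    · rw [pvBinRec, if_neg h, pvBitLen, if_neg h]
      simp [ih (n / 2) (by omega)]

theorem pad7_eq (b : List Char) :
    pvPad7 b = List.replicate (7 - b.length) '0' ++ b := by
  fun_induction pvPad7 b with
  | case1 b h ih =>
    rw [ih]
    have h7 : 7 - b.length = (7 - ('0' :: b).length) + 1 := by simp at h ⊢; omega
    rw [h7, List.replicate_succ']
    simp
  | case2 b h =>
    have : 7 - b.length = 0 := by omega
    simp [this]

theorem perChar (n : Nat) :
    pvPad7 (decimalToBinary n) = pvBits n (max 7 (pvBitLen n)) := by
  by_cases h : n = 0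
  · subst h
    rw [decimalToBinary, if_pos rfl, pad7_eq]
    have : max 7 (pvBitLen 0) = 0 + 7 := by simp [pvBitLen]
    rw [this, bits_zext 0 0 7 (by norm_num)]
    decide
  · rw [decimalToBinary, if_neg h, pad7_eq, binRec_length]
    have hmax : max 7 (pvBitLen n) = pvBitLen n + (7 - pvBitLen n) := by omega
    rw [hmax, bits_zext n _ _ (lt_two_pow_bitlen n), bits_bitlen]

-- ===== VERDICT (by name: the statement is the Claim_ definition above) =====
theorem messageToBinary_spec : Claim_equal_messageToBinary := by
  intro message _
  unfold Spec_messageToBinary messageToBinary messageToBinary_alt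
  rw [PySem.List.foldl_append_eq_flatMap, List.nil_append]
  have hf : (fun c : Char => pvPad7 (decimalToBinary c.toNat))
      = fun c : Char => pvBits c.toNat (max 7 (pvBitLen c.toNat)) :=
    funext fun c => perChar c.toNat
  rw [hf]
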